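-- pv_equiv track=rewrite | github.com/rybolovlevalexey/TimetableParserBot | old_version/parsing.py | removing_unnecessary_items
-- ===== SOURCE A (Python) =====
-- def removing_unnecessary_items(timetable: dict[str, list]) -> dict[str, list]:
--     result = dict()
--     for key, value in timetable.items():
--         result[key] = list()
--         for i in range(len(value)):
--             if i == 0 and len(value) == 1:
--                 result[key] += [value[i]]
--             elif i + 1 < len(value):
--                 if value[i][0] != value[i + 1][0] or \
--                         (value[i][0] == value[i + 1][0] and
--                          (len(result[key]) == 0 or result[key][-1][0] != value[i][0])):
--                     result[key] += [value[i]]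
--             else:
--                 if i != 0 and value[i - 1][0] != value[i][0]:
--                     result[key] += [value[i]]
--     return result
-- ===== SOURCE B (Python) =====
-- def _runs(value):
--     # group value into maximal runs of equal first component
--     runs = []
--     cur = [value[0]]
--     for x in value[1:]:
--         if x[0] == cur[0][0]:
--             cur.append(x)
--         else:
--             runs.append(cur)
--             cur = [x]
--     runs.append(cur)
--     return runs
--
--
-- def _filter_value(value):
--     if len(value) <= 1:
--         return list(value)
--     runs = _runs(value)
--     out = []
--     for run in runs[:-1]:
--         out.append(run[0])
--         if len(run) >= 2:
--             out.append(run[-1])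
--     out.append(runs[-1][0])
--     return out
--
--
-- def removing_unnecessary_items(timetable):
--     result = {}
--     for key, value in timetable.items():
--         result[key] = _filter_value(value)
--     return result
-- ===== Notes on version B (the rewrite author's own statement) =====
-- stated objective: alternative
-- what changed: A scans indices with a three-way branch on position and a lookback into the already-built result list; B first groups each value list into maximal runs of equal first components, then emits the first element of every run plus the last element of every non-final run of length >= 2.
import Mathlib
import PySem

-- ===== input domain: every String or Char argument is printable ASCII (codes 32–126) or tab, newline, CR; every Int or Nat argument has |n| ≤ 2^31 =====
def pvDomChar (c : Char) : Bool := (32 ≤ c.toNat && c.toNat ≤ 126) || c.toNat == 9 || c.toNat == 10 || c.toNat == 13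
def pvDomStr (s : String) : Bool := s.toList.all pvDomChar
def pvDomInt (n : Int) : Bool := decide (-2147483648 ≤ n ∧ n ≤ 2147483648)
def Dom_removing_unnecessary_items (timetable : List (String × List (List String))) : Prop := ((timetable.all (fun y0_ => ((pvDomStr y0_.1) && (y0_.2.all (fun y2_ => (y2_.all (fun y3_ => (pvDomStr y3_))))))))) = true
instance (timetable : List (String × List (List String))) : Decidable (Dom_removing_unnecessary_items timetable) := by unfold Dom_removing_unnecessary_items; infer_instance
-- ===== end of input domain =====

-- B replaces A's index-arithmetic scan (with its lookback into the result list) by an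
-- explicit grouping into maximal equal-key runs, then emits first/last of each run; objective: alternative.


-- x[0] of an inner element (Python raises IndexError on []; Pre_ excludes that case, the default is never read inside Pre_)
def pvKey (x : List String) : String := PySem.List.pyGetD x 0 ""

-- ===== PORT A =====
-- the inner 'for i in range(len(value))' loop of A, for one key's value list
def pvA_loop (value : List (List String)) : List (List String) :=
  (PySem.List.pyRange 0 (value.length : Int) 1).foldl (fun res i =>
    if i = 0 ∧ value.length = 1 then
      res ++ [PySem.List.pyGetD value i []]
    else if i + 1 < (value.length : Int) then
      (if pvKey (PySem.List.pyGetD value i []) ≠ pvKey (PySem.List.pyGetD value (i + 1) [])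
          ∨ (pvKey (PySem.List.pyGetD value i []) = pvKey (PySem.List.pyGetD value (i + 1) [])
             ∧ (res.length = 0 ∨ pvKey (PySem.List.pyGetD res (-1) []) ≠ pvKey (PySem.List.pyGetD value i [])))
       then res ++ [PySem.List.pyGetD value i []] else res)
    else
      (if i ≠ 0 ∧ pvKey (PySem.List.pyGetD value (i - 1) []) ≠ pvKey (PySem.List.pyGetD value i [])
       then res ++ [PySem.List.pyGetD value i []] else res)) []

def removing_unnecessary_items (timetable : List (String × List (List String))) : List (String × List (List String)) :=
  (timetable.foldl (fun (result : PySem.Dict String (List (List String))) kv =>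
    result.insert kv.1 (pvA_loop kv.2)) PySem.Dict.empty).items

-- ===== PORT B =====
-- _runs: group value into maximal runs of equal first component (loop with a (runs, cur) accumulator)
def pvRunsB (value : List (List String)) : List (List (List String)) :=
  match value with
  | [] => []   -- never called on [] (guarded by len ≤ 1 in pvFilterB)
  | v0 :: rest =>
    let st := rest.foldl (fun (st : List (List (List String)) × List (List String)) x =>
      if pvKey x = pvKey (PySem.List.pyGetD st.2 0 []) then (st.1, st.2 ++ [x])
      else (st.1 ++ [st.2], [x])) ([], [v0])
    st.1 ++ [st.2]

-- _filter_value
def pvFilterB (value : List (List String)) : List (List String) :=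
  if value.length ≤ 1 then value
  else
    let runs := pvRunsB value
    let out := (PySem.List.slice runs none (some (-1))).foldl (fun out run =>
      let out := out ++ [PySem.List.pyGetD run 0 []]
      if 2 ≤ run.length then out ++ [PySem.List.pyGetD run (-1) []] else out) []
    out ++ [PySem.List.pyGetD (PySem.List.pyGetD runs (-1) []) 0 []]

def removing_unnecessary_items_alt (timetable : List (String × List (List String))) : List (String × List (List String)) :=
  (timetable.foldl (fun (result : PySem.Dict String (List (List String))) kv =>
    result.insert kv.1 (pvFilterB kv.2)) PySem.Dict.empty).items

-- ===== PRECONDITION & SPEC =====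
-- Pre_ excludes exactly the inputs where Python A raises IndexError: a value list of length ≥ 2
-- containing an empty inner list (A subscripts every element's [0] there; B raises there too).
def Pre_removing_unnecessary_items (timetable : List (String × List (List String))) : Prop :=
  ∀ p ∈ timetable, p.2.length ≤ 1 ∨ ∀ l ∈ p.2, l ≠ []
instance (timetable : List (String × List (List String))) : Decidable (Pre_removing_unnecessary_items timetable) := by
  unfold Pre_removing_unnecessary_items; infer_instance

def pvWitness_removing_unnecessary_items : (List (String × List (List String))) :=
  [("Mon", [["a", "x"], ["a", "y"], ["a", "z"], ["b", "w"]]), ("Tue", [["c"]])]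

def Spec_removing_unnecessary_items (timetable : List (String × List (List String))) (out : List (String × List (List String))) : Prop := out = removing_unnecessary_items_alt timetable
instance (timetable : List (String × List (List String))) (out : List (String × List (List String))) : Decidable (Spec_removing_unnecessary_items timetable out) := by unfold Spec_removing_unnecessary_items; infer_instance

-- ===== CLAIM (what is proved, stated in full; the proofs are below) =====
def Claim_equal_removing_unnecessary_items : Prop := ∀ (timetable : List (String × List (List String))), Dom_removing_unnecessary_items timetable → Pre_removing_unnecessary_items timetable → Spec_removing_unnecessary_items timetable (removing_unnecessary_items timetable)

-- ===== LEMMAS AND PROOFS =====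

-- common specification of the per-value result: keep an element iff its key differs from the
-- previous element's key (prev, as an Option) or from the next element's key (when one exists)
def pvG (prev : Option String) : List (List String) → List (List String)
  | [] => []
  | a :: t =>
      (if prev ≠ some (pvKey a) ∨ (t ≠ [] ∧ pvKey a ≠ pvKey (t.headD [])) then [a] else [])
        ++ pvG (some (pvKey a)) t

lemma pyGetD_neg_one {α : Type} (xs : List α) (d : α) :
    PySem.List.pyGetD xs (-1) d = xs.getLast?.getD d := by
  simp [PySem.List.pyGetD, PySem.List.pyGet?_neg_one]

lemma pyGetD_zero_headD (cur : List (List String)) (h : cur ≠ []) :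
    PySem.List.pyGetD cur 0 [] = cur.headD [] := by
  cases cur with
  | nil => simp at h
  | cons c cs => simp [PySem.List.pyGetD]

-- ---- B side: runs grouping, recursively ----
def pvRunsRec (cur : List (List String)) : List (List String) → List (List (List String))
  | [] => [cur]
  | x :: t => if pvKey x = pvKey (cur.headD []) then pvRunsRec (cur ++ [x]) t
              else cur :: pvRunsRec [x] t

lemma pvRunsRec_ne_nil (cur : List (List String)) (l : List (List String)) :
    pvRunsRec cur l ≠ [] := by
  induction l generalizing cur with
  | nil => simp [pvRunsRec]
  | cons x t ih => simp only [pvRunsRec]; split <;> simp [ih]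

lemma runs_fold (rest : List (List String)) : ∀ (rs : List (List (List String))) (cur : List (List String)), cur ≠ [] →
    (rest.foldl (fun (st : List (List (List String)) × List (List String)) x =>
      if pvKey x = pvKey (PySem.List.pyGetD st.2 0 []) then (st.1, st.2 ++ [x])
      else (st.1 ++ [st.2], [x])) (rs, cur)).1
    ++ [(rest.foldl (fun (st : List (List (List String)) × List (List String)) x =>
      if pvKey x = pvKey (PySem.List.pyGetD st.2 0 []) then (st.1, st.2 ++ [x])
      else (st.1 ++ [st.2], [x])) (rs, cur)).2]
    = rs ++ pvRunsRec cur rest := by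
  induction rest with
  | nil => intro rs cur h; simp [pvRunsRec]
  | cons x t ih =>
    intro rs cur h
    simp only [List.foldl_cons, pvRunsRec, pyGetD_zero_headD cur h]
    by_cases hk : pvKey x = pvKey (cur.headD [])
    · simp only [hk, if_true]
      exact ih rs (cur ++ [x]) (by simp)
    · simp only [if_neg hk]
      rw [ih (rs ++ [cur]) [x] (by simp)]
      simp

lemma pvRunsB_eq_runsRec (v0 : List String) (rest : List (List String)) :
    pvRunsB (v0 :: rest) = pvRunsRec [v0] rest := by
  have := runs_fold rest [] [v0] (by simp)
  simpa [pvRunsB] using this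

-- ---- B side: the output loop as an emit over the run list ----
def pvEmit (runs : List (List (List String))) : List (List String) :=
  runs.dropLast.flatMap (fun run =>
      [PySem.List.pyGetD run 0 []] ++ (if 2 ≤ run.length then [PySem.List.pyGetD run (-1) []] else []))
    ++ [PySem.List.pyGetD (PySem.List.pyGetD runs (-1) []) 0 []]

lemma pvFilterB_eq_emit (v : List (List String)) (h : 2 ≤ v.length) :
    pvFilterB v = pvEmit (pvRunsB v) := by
  unfold pvFilterB pvEmit
  rw [if_neg (by omega)]
  simp only []
  show List.foldl _ [] (PySem.List.slice (pvRunsB v) none (some (-1))) ++ _ = _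
  rw [PySem.List.slice_to_neg_one]
  congr 1
  rw [show (fun (out : List (List String)) run =>
      let out := out ++ [PySem.List.pyGetD run 0 []]
      if 2 ≤ run.length then out ++ [PySem.List.pyGetD run (-1) []] else out)
    = (fun out run => out ++ ([PySem.List.pyGetD run 0 []]
        ++ (if 2 ≤ run.length then [PySem.List.pyGetD run (-1) []] else []))) from by
      funext out run; by_cases h2 : 2 ≤ run.length <;> simp [h2]]
  rw [PySem.List.foldl_append_eq_flatMap]
  simp

lemma pvEmit_singleton (cur : List (List String)) (h : cur ≠ []) :
    pvEmit [cur] = [cur.headD []] := by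
  simp [pvEmit, pyGetD_neg_one, pyGetD_zero_headD cur h]

lemma pvEmit_cons (cur : List (List String)) (rs : List (List (List String))) (h : rs ≠ []) :
    pvEmit (cur :: rs) =
      [PySem.List.pyGetD cur 0 []]
        ++ (if 2 ≤ cur.length then [PySem.List.pyGetD cur (-1) []] else []) ++ pvEmit rs := by
  obtain ⟨r, rs', rfl⟩ := List.exists_cons_of_ne_nil h
  simp [pvEmit, pyGetD_neg_one]

lemma pvG_uniform_nil (p : String) (m : List (List String)) (hm : ∀ y ∈ m, pvKey y = p) :
    pvG (some p) m = [] := by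
  induction m with
  | nil => rfl
  | cons a m' ih =>
    have ha : pvKey a = p := hm a (by simp)
    have key : pvG (some p) (a :: m') =
        (if (some p ≠ some (pvKey a) ∨ (m' ≠ [] ∧ pvKey a ≠ pvKey (m'.headD [])))
          then [a] else []) ++ pvG (some (pvKey a)) m' := rfl
    rw [key, ha, ih (fun y hy => hm y (by simp [hy]))]
    cases m' with
    | nil => simp
    | cons b m'' =>
      have hb : pvKey b = p := hm b (by simp)
      simp [hb]

lemma pvG_uniform_append (p : String) (m : List (List String)) (x : List String)
    (t : List (List String)) (hm : ∀ y ∈ m, pvKey y = p) (hx : pvKey x ≠ p) :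
    pvG (some p) (m ++ x :: t) =
      (if m ≠ [] then [m.getLast?.getD []] else []) ++ [x] ++ pvG (some (pvKey x)) t := by
  induction m with
  | nil =>
    have hpx : ¬ p = pvKey x := fun h => hx h.symm
    simp [pvG, hpx]
  | cons a m' ih =>
    have ha : pvKey a = p := hm a (by simp)
    have key : pvG (some p) (a :: (m' ++ x :: t)) =
        (if (some p ≠ some (pvKey a) ∨ ((m' ++ x :: t) ≠ [] ∧ pvKey a ≠ pvKey ((m' ++ x :: t).headD [])))
          then [a] else []) ++ pvG (some (pvKey a)) (m' ++ x :: t) := rfl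
    rw [List.cons_append, key, ha]
    cases m' with
    | nil =>
      have hpx : ¬ p = pvKey x := fun h => hx h.symm
      simp [pvG, hpx]
    | cons b m'' =>
      have hb : pvKey b = p := hm b (by simp)
      rw [ih (fun y hy => hm y (by simp [hy]))]
      simp [hb, List.getLast?_cons_cons]

lemma pvEmit_runsRec (rest : List (List String)) : ∀ (cur : List (List String)), cur ≠ [] →
    (∀ y ∈ cur, pvKey y = pvKey (cur.headD [])) →
    pvEmit (pvRunsRec cur rest) =
      [cur.headD []] ++ pvG (some (pvKey (cur.headD []))) (cur.tail ++ rest) := by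
  induction rest with
  | nil =>
    intro cur hc hu
    rw [pvRunsRec, pvEmit_singleton cur hc, List.append_nil,
      pvG_uniform_nil _ _ (fun y hy => hu y (List.mem_of_mem_tail hy))]
    simp
  | cons x t ih =>
    intro cur hc hu
    rw [pvRunsRec]
    by_cases hk : pvKey x = pvKey (cur.headD [])
    · rw [if_pos hk]
      have h1 : (cur ++ [x]).headD [] = cur.headD [] := by
        cases cur with | nil => exact absurd rfl hc | cons c cs => rfl
      have h2 : ∀ y ∈ cur ++ [x], pvKey y = pvKey ((cur ++ [x]).headD []) := by
        intro y hy
        rw [h1]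
        rcases List.mem_append.1 hy with h | h
        · exact hu y h
        · simp at h; subst h; exact hk
      rw [ih (cur ++ [x]) (by simp) h2, h1]
      have h3 : (cur ++ [x]).tail ++ t = cur.tail ++ (x :: t) := by
        cases cur with | nil => exact absurd rfl hc | cons c cs => simp
      rw [h3]
    · rw [if_neg hk]
      rw [pvEmit_cons cur _ (pvRunsRec_ne_nil _ _)]
      rw [ih [x] (by simp) (by simp)]
      rw [pvG_uniform_append (pvKey (cur.headD [])) cur.tail x t
        (fun y hy => hu y (List.mem_of_mem_tail hy)) hk]
      obtain ⟨c, cs, rfl⟩ := List.exists_cons_of_ne_nil hc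
      rw [pyGetD_zero_headD _ hc, pyGetD_neg_one]
      cases cs with
      | nil => simp
      | cons b cs' => simp [List.getLast?_cons_cons]

lemma pvB_eq_g (v : List (List String)) : pvFilterB v = pvG none v := by
  match v with
  | [] => rfl
  | [a] =>
    show pvFilterB [a] = pvG none [a]
    rw [pvFilterB, if_pos (by simp)]
    simp [pvG]
  | a :: b :: t =>
    rw [pvFilterB_eq_emit _ (by simp), pvRunsB_eq_runsRec,
      pvEmit_runsRec (b :: t) [a] (by simp) (by simp)]
    have : pvG none (a :: b :: t) =
        (if (none ≠ some (pvKey a) ∨ ((b :: t) ≠ [] ∧ pvKey a ≠ pvKey ((b :: t).headD [])))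
          then [a] else []) ++ pvG (some (pvKey a)) (b :: t) := rfl
    rw [this, if_pos (Or.inl (show (none : Option String) ≠ some (pvKey a) from by simp))]
    simp

-- ---- A side: loop invariant for the index fold from position j on ----
lemma pvA_inv (v : List (List String)) (m : Nat) : ∀ (j : Nat) (res : List (List String)),
    j + m = v.length → 1 ≤ j → res ≠ [] →
    pvKey (res.getLast?.getD []) = pvKey (v.getD (j - 1) []) →
    (PySem.List.pyRange (j : Int) (v.length : Int) 1).foldl (fun res i =>
      if i = 0 ∧ v.length = 1 then
        res ++ [PySem.List.pyGetD v i []]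
      else if i + 1 < (v.length : Int) then
        (if pvKey (PySem.List.pyGetD v i []) ≠ pvKey (PySem.List.pyGetD v (i + 1) [])
            ∨ (pvKey (PySem.List.pyGetD v i []) = pvKey (PySem.List.pyGetD v (i + 1) [])
               ∧ (res.length = 0 ∨ pvKey (PySem.List.pyGetD res (-1) []) ≠ pvKey (PySem.List.pyGetD v i [])))
         then res ++ [PySem.List.pyGetD v i []] else res)
      else
        (if i ≠ 0 ∧ pvKey (PySem.List.pyGetD v (i - 1) []) ≠ pvKey (PySem.List.pyGetD v i [])
         then res ++ [PySem.List.pyGetD v i []] else res)) res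
      = res ++ pvG (some (pvKey (v.getD (j - 1) []))) (v.drop j) := by
  induction m with
  | zero =>
    intro j res hjm hj hres hlast
    rw [PySem.List.pyRange_one_eq_nil (by omega), List.drop_of_length_le (by omega)]
    simp [pvG]
  | succ m ih =>
    intro j res hjm hj hres hlast
    have hjlt : j < v.length := by omega
    rw [PySem.List.pyRange_one_cons (by exact_mod_cast hjlt)]
    simp only [List.foldl_cons]
    have e1 : (j : Int) + 1 = ((j + 1 : Nat) : Int) := by push_cast; ring
    have hne0 : ¬((j : Int) = 0 ∧ v.length = 1) := by omega
    have em1 : (j : Int) - 1 = ((j - 1 : Nat) : Int) := by omega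
    have hdrop : v.drop j = v.getD j [] :: v.drop (j + 1) := by
      rw [List.getD_eq_getElem _ _ hjlt]
      exact (List.getElem_cons_drop hjlt).symm
    have hreslen : res.length ≠ 0 := by simpa [List.length_eq_zero_iff] using hres
    rw [if_neg hne0]
    by_cases hmid : (j : Int) + 1 < (v.length : Int)
    · have hj1 : j + 1 < v.length := by exact_mod_cast hmid
      rw [if_pos hmid, e1]
      simp only [PySem.List.pyGetD_natCast]
      have hdne : v.drop (j + 1) ≠ [] := by simp [List.drop_eq_nil_iff]; omega
      have hGstep : pvG (some (pvKey (v.getD (j - 1) []))) (v.drop j)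
          = (if (some (pvKey (v.getD (j - 1) [])) ≠ some (pvKey (v.getD j []))
              ∨ (v.drop (j + 1) ≠ [] ∧ pvKey (v.getD j []) ≠ pvKey (v.getD (j + 1) [])))
             then [v.getD j []] else []) ++ pvG (some (pvKey (v.getD j []))) (v.drop (j + 1)) := by
        rw [hdrop, pvG]
        simp [hdne]
      by_cases h1 : pvKey (v.getD j []) = pvKey (v.getD (j + 1) [])
      · by_cases h2 : pvKey (res.getLast?.getD []) = pvKey (v.getD j [])
        · -- middle of a run: not kept
          rw [if_neg (by
            intro hc
            rcases hc with hc | ⟨_, hc⟩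
            · exact hc h1
            rcases hc with hc | hc
            · exact hreslen hc
            · rw [pyGetD_neg_one] at hc; exact hc h2)]
          rw [ih (j + 1) res (by omega) (by omega) hres
            (by rw [Nat.add_sub_cancel]; exact h2), hGstep]
          simp only [Nat.add_sub_cancel]
          rw [if_neg (by
            intro hc
            rcases hc with hc | ⟨_, hc⟩
            · exact hc (congrArg some (hlast.symm.trans h2))
            · exact hc h1)]
          rw [List.nil_append]
        · -- run start: kept
          rw [if_pos (Or.inr ⟨h1, Or.inr (by rw [pyGetD_neg_one]; exact h2)⟩)]
          rw [ih (j + 1) (res ++ [v.getD j []]) (by omega) (by omega) (by simp)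
            (by rw [Nat.add_sub_cancel, List.getLast?_concat]; rfl), hGstep]
          simp only [Nat.add_sub_cancel]
          rw [if_pos (Or.inl (fun hs => (hlast ▸ h2) (Option.some.inj hs)))]
          rw [List.append_assoc]
      · -- end of a run (next differs): kept
        rw [if_pos (Or.inl h1)]
        rw [ih (j + 1) (res ++ [v.getD j []]) (by omega) (by omega) (by simp)
          (by rw [Nat.add_sub_cancel, List.getLast?_concat]; rfl), hGstep]
        simp only [Nat.add_sub_cancel]
        rw [if_pos (Or.inr ⟨hdne, h1⟩)]
        rw [List.append_assoc]
    · -- last element: j = length - 1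
      have hjne : (j : Int) ≠ 0 := by omega
      rw [if_neg hmid]
      rw [PySem.List.pyRange_one_eq_nil (by omega)]
      simp only [em1, PySem.List.pyGetD_natCast, List.foldl_nil]
      have hdropj : v.drop j = [v.getD j []] := by
        rw [hdrop, List.drop_eq_nil_iff.2 (by omega)]
      rw [hdropj, pvG]
      by_cases h2 : pvKey (v.getD (j - 1) []) = pvKey (v.getD j [])
      · rw [if_neg (fun hc => hc.2 h2), if_neg (by
          intro hc
          rcases hc with hc | ⟨hc, _⟩
          · exact hc (congrArg some h2)
          · exact hc rfl)]
        simp [pvG]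
      · rw [if_pos ⟨hjne, h2⟩, if_pos (Or.inl (fun hs => h2 (Option.some.inj hs)))]
        simp [pvG]

lemma pvA_eq_g (v : List (List String)) : pvA_loop v = pvG none v := by
  match v with
  | [] => rfl
  | [a] =>
    unfold pvA_loop
    rw [show (([a] : List (List String)).length : Int) = 0 + 1 from by simp,
      PySem.List.pyRange_one_singleton]
    simp [pvG, PySem.List.pyGetD]
  | a :: b :: t =>
    unfold pvA_loop
    have hlen : (a :: b :: t).length = t.length + 2 := by simp
    rw [PySem.List.pyRange_one_cons (by rw [hlen]; push_cast; omega)]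
    simp only [List.foldl_cons]
    rw [if_neg (by rw [hlen]; omega)]
    rw [if_pos (by rw [hlen]; push_cast; omega)]
    rw [if_pos (by
      by_cases hk : pvKey (PySem.List.pyGetD (a :: b :: t) 0 [])
          = pvKey (PySem.List.pyGetD (a :: b :: t) (0 + 1) [])
      · exact Or.inr ⟨hk, Or.inl rfl⟩
      · exact Or.inl hk)]
    have ha0 : PySem.List.pyGetD (a :: b :: t) (0 : Int) [] = a := by
      simp [PySem.List.pyGetD]
    rw [show ((0 : Int) + 1) = ((1 : Nat) : Int) from by norm_num, ha0]
    rw [pvA_inv (a :: b :: t) (t.length + 1) 1 ([] ++ [a]) (by simp; omega) (by omega)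
      (by simp) (by simp)]
    have : pvG none (a :: b :: t) =
        (if (none ≠ some (pvKey a) ∨ ((b :: t) ≠ [] ∧ pvKey a ≠ pvKey ((b :: t).headD [])))
          then [a] else []) ++ pvG (some (pvKey a)) (b :: t) := rfl
    rw [this, if_pos (Or.inl (show (none : Option String) ≠ some (pvKey a) from by simp))]
    simp

-- ===== VERDICT (by name: the statement is the Claim_ definition above) =====
theorem removing_unnecessary_items_spec : Claim_equal_removing_unnecessary_items := by
  intro timetable _ _
  unfold Spec_removing_unnecessary_items removing_unnecessary_items removing_unnecessary_items_alt
  have h : (fun (result : PySem.Dict String (List (List String))) (kv : String × List (List String)) =>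
      result.insert kv.1 (pvA_loop kv.2))
      = (fun result kv => result.insert kv.1 (pvFilterB kv.2)) := by
    funext d kv
    rw [pvA_eq_g, ← pvB_eq_g]
  rw [h]
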